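-- pv_equiv track=rewrite | github.com/FredC94/MOOC-Python3 | UpyLab/UpyLaB 6.5 - Manip sur dictionnaires.py | construction_dict_amis
-- ===== SOURCE A (Python) =====
-- def construction_dict_amis(personnes):
--     dic = {}
--     for prenom1, prenom2 in personnes:
--         if prenom1 not in dic:
--             dic[prenom1] = {prenom2}
--         else:
--             dic[prenom1].add(prenom2)
--         if prenom2 not in dic:
--             dic[prenom2] = set()
--     return dic
-- ===== SOURCE B (Python) =====
-- def construction_dict_amis(personnes):
--     # ordered dedup of all names, then one set comprehension per name over the pairs
--     names = dict.fromkeys(n for pair in personnes for n in pair)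
--     return {k: {q for p, q in personnes if p == k} for k in names}
-- ===== Notes on version B (the rewrite author's own statement) =====
-- stated objective: alternative
-- what changed: Instead of one incremental pass mutating a dict with conditional registration, B first computes the ordered-deduplicated list of all names (dict.fromkeys) and then builds the result by a per-key set comprehension that rescans the pairs for each name.
import Mathlib
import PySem

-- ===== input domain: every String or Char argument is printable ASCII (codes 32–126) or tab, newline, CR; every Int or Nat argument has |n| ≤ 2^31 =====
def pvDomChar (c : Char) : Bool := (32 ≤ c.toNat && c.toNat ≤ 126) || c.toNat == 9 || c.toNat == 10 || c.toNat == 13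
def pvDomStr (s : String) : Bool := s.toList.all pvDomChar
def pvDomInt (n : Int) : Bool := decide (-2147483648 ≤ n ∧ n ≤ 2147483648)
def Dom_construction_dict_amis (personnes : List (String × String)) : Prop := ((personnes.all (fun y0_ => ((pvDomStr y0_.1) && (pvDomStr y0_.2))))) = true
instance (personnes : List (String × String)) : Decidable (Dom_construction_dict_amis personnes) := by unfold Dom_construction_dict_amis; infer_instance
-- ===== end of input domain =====

-- B replaces A's single conditional-mutation pass by an ordered dedup of all names followed by a per-name set comprehension over the pairs (alternative decomposition); proved to return the same dict.


-- ===== PORT A =====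
-- one pass; per pair: register/extend p.1's set, then register p.2 if absent
def pvStepA (d : PySem.Dict String (PySem.Set String)) (p : String × String) :
    PySem.Dict String (PySem.Set String) :=
  let d1 := if d.contains p.1 = false
            then d.insert p.1 (PySem.Set.ofList [p.2])
            else d.modify p.1 PySem.Set.empty (fun s => PySem.Set.add s p.2)
  if d1.contains p.2 = false then d1.insert p.2 PySem.Set.empty else d1

def construction_dict_amis (personnes : List (String × String)) : List (String × List String) :=
  (personnes.foldl pvStepA PySem.Dict.empty).items

-- ===== PORT B =====
-- names = dict.fromkeys(n for pair in personnes for n in pair)  — ordered dedup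
-- {k: {q for p, q in personnes if p == k} for k in names}       — per-name set comprehension
def pvFriendsOf (personnes : List (String × String)) (k : String) : PySem.Set String :=
  PySem.Set.ofList ((personnes.filter (fun p => p.1 == k)).map (·.2))

def construction_dict_amis_alt (personnes : List (String × String)) : List (String × List String) :=
  let names := PySem.List.dedup (personnes.flatMap (fun p => [p.1, p.2]))
  (names.foldl (fun d k => d.insert k (pvFriendsOf personnes k)) PySem.Dict.empty).items

-- ===== PRECONDITION & SPEC =====
def Spec_construction_dict_amis (personnes : List (String × String)) (out : List (String × List String)) : Prop := out = construction_dict_amis_alt personnes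
instance (personnes : List (String × String)) (out : List (String × List String)) : Decidable (Spec_construction_dict_amis personnes out) := by unfold Spec_construction_dict_amis; infer_instance

-- ===== CLAIM (what is proved, stated in full; the proofs are below) =====
def Claim_equal_construction_dict_amis : Prop := ∀ (personnes : List (String × String)), Dom_construction_dict_amis personnes → Spec_construction_dict_amis personnes (construction_dict_amis personnes)

-- ===== LEMMAS AND PROOFS =====

-- all names, in order of appearance (p.1 before p.2 per pair)
def pvFlat (ps : List (String × String)) : List String := ps.flatMap (fun p => [p.1, p.2])

-- the friends added to key k's set, in order
def pvSrc (k : String) (ps : List (String × String)) : List String :=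
  (ps.filter (fun p => p.1 == k)).map (·.2)

lemma pvFlat_cons (p : String × String) (ps : List (String × String)) :
    pvFlat (p :: ps) = p.1 :: p.2 :: pvFlat ps := rfl

lemma pvSrc_cons (k : String) (p : String × String) (ps : List (String × String)) :
    pvSrc k (p :: ps) = if p.1 = k then p.2 :: pvSrc k ps else pvSrc k ps := by
  simp [pvSrc, List.filter_cons]
  by_cases h : p.1 = k <;> simp [h]

-- (d.insert k v).keys = d.keys with k appended if new: always PySem.Set.add
lemma keys_insert_eq_add (d : PySem.Dict String (PySem.Set String)) (k : String)
    (v : PySem.Set String) : (d.insert k v).keys = PySem.Set.add d.keys k := by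
  by_cases h : d.contains k = true
  · rw [PySem.Dict.keys_insert_of_contains d v h,
      PySem.Set.add_of_mem ((PySem.Dict.contains_iff_mem_keys d k).mp h)]
  · have h' : d.contains k = false := by simpa using h
    rw [PySem.Dict.keys_insert_of_not_contains d v h', PySem.Set.add_of_not_mem]
    intro hm
    exact h ((PySem.Dict.contains_iff_mem_keys d k).mpr hm)

-- registering p.2 if absent is PySem.Set.add on the keys
lemma keys_reg_snd (c : PySem.Dict String (PySem.Set String)) (b : String) :
    (if c.contains b = false then c.insert b PySem.Set.empty else c).keys =
      PySem.Set.add c.keys b := by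
  by_cases h : c.contains b = false
  · rw [if_pos h, keys_insert_eq_add]
  · have h' : c.contains b = true := by simpa using h
    rw [if_neg h, PySem.Set.add_of_mem ((PySem.Dict.contains_iff_mem_keys c b).mp h')]

-- keys of one A-step
lemma keys_pvStepA (d : PySem.Dict String (PySem.Set String)) (p : String × String) :
    (pvStepA d p).keys = PySem.Set.add (PySem.Set.add d.keys p.1) p.2 := by
  unfold pvStepA
  by_cases h : d.contains p.1 = false
  · rw [if_pos h]
    rw [keys_reg_snd, keys_insert_eq_add]
  · rw [if_neg h]
    rw [keys_reg_snd, PySem.Dict.keys_modify, keys_insert_eq_add]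

-- registering p.2 if absent never changes the value read at any key (default is empty)
lemma getD_reg_snd (c : PySem.Dict String (PySem.Set String)) (b k : String) :
    (if c.contains b = false then c.insert b PySem.Set.empty else c).getD k PySem.Set.empty =
      c.getD k PySem.Set.empty := by
  by_cases h : c.contains b = false
  · rw [if_pos h, PySem.Dict.getD_insert]
    by_cases hk : k = b
    · rw [if_pos hk, hk, PySem.Dict.getD_of_not_contains c _ h]
    · rw [if_neg hk]
  · rw [if_neg h]

-- value at k of one A-step
lemma getD_pvStepA (d : PySem.Dict String (PySem.Set String)) (p : String × String) (k : String) :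
    (pvStepA d p).getD k PySem.Set.empty =
      if p.1 = k then PySem.Set.add (d.getD k PySem.Set.empty) p.2
      else d.getD k PySem.Set.empty := by
  unfold pvStepA
  rw [getD_reg_snd]
  by_cases h : d.contains p.1 = false
  · rw [if_pos h, PySem.Dict.getD_insert]
    by_cases hk : p.1 = k
    · rw [if_pos hk.symm, if_pos hk, ← hk, PySem.Dict.getD_of_not_contains d _ h]
      rfl
    · rw [if_neg (fun e => hk e.symm), if_neg hk]
  · rw [if_neg h, PySem.Dict.getD_modify]
    by_cases hk : p.1 = k
    · rw [if_pos hk.symm, if_pos hk, hk]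
    · rw [if_neg (fun e => hk e.symm), if_neg hk]

lemma keys_foldA (ps : List (String × String)) :
    ∀ d, (ps.foldl pvStepA d).keys = PySem.Set.update d.keys (pvFlat ps) := by
  induction ps with
  | nil => intro d; simp [pvFlat, PySem.Set.update]
  | cons p ps ih =>
      intro d
      rw [List.foldl_cons, ih, keys_pvStepA, pvFlat_cons,
        PySem.Set.update_cons, PySem.Set.update_cons]

lemma getD_foldA (ps : List (String × String)) :
    ∀ d k, (ps.foldl pvStepA d).getD k PySem.Set.empty =
      PySem.Set.update (d.getD k PySem.Set.empty) (pvSrc k ps) := by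
  induction ps with
  | nil => intro d k; simp [pvSrc, PySem.Set.update]
  | cons p ps ih =>
      intro d k
      rw [List.foldl_cons, ih, getD_pvStepA, pvSrc_cons]
      by_cases h : p.1 = k <;> simp [h, PySem.Set.update_cons]

-- ===== VERDICT (by name: the statement is the Claim_ definition above) =====
theorem construction_dict_amis_spec : Claim_equal_construction_dict_amis := by
  intro ps _
  unfold Spec_construction_dict_amis construction_dict_amis construction_dict_amis_alt
  have hkA : (ps.foldl pvStepA PySem.Dict.empty).keys = PySem.Set.ofList (pvFlat ps) := by
    rw [keys_foldA, PySem.Dict.keys_empty, PySem.Set.update_nil_left]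
  -- B's fold inserts fresh distinct keys into the empty dict, so its items list is exactly the map
  have hB : (((PySem.List.dedup (pvFlat ps)).foldl
        (fun d k => d.insert k (pvFriendsOf ps k)) PySem.Dict.empty)).items =
      (PySem.List.dedup (pvFlat ps)).map (fun k => (k, pvFriendsOf ps k)) := by
    rw [PySem.Dict.items_foldl_insert_fresh (PySem.List.dedup (pvFlat ps)) (fun x => x)
      (fun k => pvFriendsOf ps k) PySem.Dict.empty
      (fun a _ => by simp [pysem]) (by simp)]
    simp [PySem.Dict.empty]
  show (ps.foldl pvStepA PySem.Dict.empty).items =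
    ((PySem.List.dedup (pvFlat ps)).foldl
      (fun d k => d.insert k (pvFriendsOf ps k)) PySem.Dict.empty).items
  rw [hB,
    PySem.Dict.items_eq_map_keys _ (by rw [hkA]; exact PySem.Set.nodup_ofList _) PySem.Set.empty,
    hkA, PySem.List.dedup_eq_ofList]
  refine List.map_congr_left (fun k _ => ?_)
  rw [getD_foldA, PySem.Dict.getD_empty]
  rfl
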